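-- pv_equiv track=rewrite | github.com/ark2016/VK-Technopark-project-2024 | data_mining/tests/functions/file_321_340.py | find_common_elements_diff_index
-- ===== SOURCE A (Python) =====
-- def find_common_elements_diff_index(lst1, lst2):
--     result = []
--     for i, num1 in enumerate(lst1):
--         for j, num2 in enumerate(lst2):
--             if num1 == num2 and i != j:
--                 result.append(num1)
--     if not result:
--         return None
--     return sorted(set(result))
-- ===== SOURCE B (Python) =====
-- def find_common_elements_diff_index(lst1, lst2):
--     common = set(lst1) & set(lst2)
--     out = [v for v in common
--            if not (lst1.count(v) == 1 and lst2.count(v) == 1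
--                    and lst1.index(v) == lst2.index(v))]
--     return sorted(out) if out else None
-- ===== Notes on version B (the rewrite author's own statement) =====
-- stated objective: faster
-- what changed: Instead of scanning all index pairs of the two lists, B intersects the two value sets and, for each common value, decides membership with a count/first-index test (a value is excluded only when it occurs exactly once in each list at the same index).
import Mathlib
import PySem

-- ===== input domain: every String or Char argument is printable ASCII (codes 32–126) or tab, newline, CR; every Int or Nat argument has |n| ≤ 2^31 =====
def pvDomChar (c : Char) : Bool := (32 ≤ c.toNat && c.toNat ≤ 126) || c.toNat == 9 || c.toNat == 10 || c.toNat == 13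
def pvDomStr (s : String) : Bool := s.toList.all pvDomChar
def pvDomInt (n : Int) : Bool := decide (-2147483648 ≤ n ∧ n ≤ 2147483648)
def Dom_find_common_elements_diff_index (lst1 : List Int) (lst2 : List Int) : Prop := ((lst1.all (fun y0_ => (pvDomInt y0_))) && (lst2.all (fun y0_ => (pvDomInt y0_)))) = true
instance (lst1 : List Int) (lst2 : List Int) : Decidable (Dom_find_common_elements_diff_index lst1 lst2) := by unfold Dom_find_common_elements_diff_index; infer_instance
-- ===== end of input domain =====

-- B replaces A's scan over all index pairs by a set intersection plus a per-value count/first-index test (faster).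


-- ===== PORT A =====
-- for i, num1 in enumerate(lst1): for j, num2 in enumerate(lst2): if num1 == num2 and i != j: result.append(num1)
def find_common_elements_diff_index (lst1 : List Int) (lst2 : List Int) : Option (List Int) :=
  let result : List Int :=
    (PySem.List.enumerate lst1).foldl (fun acc p =>
      (PySem.List.enumerate lst2).foldl (fun acc2 q =>
        if p.2 == q.2 && !(p.1 == q.1) then acc2 ++ [p.2] else acc2) acc) []
  if result = [] then none
  else some (PySem.List.sorted (PySem.Set.ofList result) (fun x => x) false)

-- ===== PORT B =====
-- common = set(lst1) & set(lst2); out = [v for v in common if not (…count/index test…)]; sorted(out) if out else None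
def find_common_elements_diff_index_alt (lst1 : List Int) (lst2 : List Int) : Option (List Int) :=
  let common : PySem.Set Int := PySem.Set.inter (PySem.Set.ofList lst1) (PySem.Set.ofList lst2)
  let out : List Int := common.filter (fun v =>
    !(lst1.count v == 1 && lst2.count v == 1 &&
      PySem.List.index? lst1 v == PySem.List.index? lst2 v))
  if out = [] then none else some (PySem.List.sorted out (fun x => x) false)

-- ===== PRECONDITION & SPEC =====
def Spec_find_common_elements_diff_index (lst1 : List Int) (lst2 : List Int) (out : Option (List Int)) : Prop := out = find_common_elements_diff_index_alt lst1 lst2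
instance (lst1 : List Int) (lst2 : List Int) (out : Option (List Int)) : Decidable (Spec_find_common_elements_diff_index lst1 lst2 out) := by unfold Spec_find_common_elements_diff_index; infer_instance

-- ===== CLAIM (what is proved, stated in full; the proofs are below) =====
def Claim_equal_find_common_elements_diff_index : Prop := ∀ (lst1 : List Int) (lst2 : List Int), Dom_find_common_elements_diff_index lst1 lst2 → Spec_find_common_elements_diff_index lst1 lst2 (find_common_elements_diff_index lst1 lst2)

-- ===== LEMMAS AND PROOFS =====

-- the condition "v occurs in both lists at some pair of differing indices"
def hasDiffPair (lst1 lst2 : List Int) (v : Int) : Prop :=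
  ∃ i j, ∃ _ : i < lst1.length, ∃ _ : j < lst2.length, lst1[i] = v ∧ lst2[j] = v ∧ i ≠ j

-- count = 1 means the occurrence index is unique
theorem count_one_uniq (l : List Int) (v : Int) (h : l.count v = 1)
    (i j : Nat) (hi : i < l.length) (hj : j < l.length)
    (h1 : l[i] = v) (h2 : l[j] = v) : i = j := by
  induction l generalizing i j with
  | nil => simp at hi
  | cons x t ih =>
    rw [List.count_cons] at h
    match i, j with
    | 0, 0 => rfl
    | 0, j+1 =>
      exfalso
      have hx : x = v := by simpa using h1
      have hj' : j < t.length := by simpa using hj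
      have h2' : t[j] = v := by simpa using h2
      have hm : v ∈ t := List.mem_iff_getElem.mpr ⟨j, hj', h2'⟩
      have := List.count_pos_iff.mpr hm
      simp [hx] at h; omega
    | i+1, 0 =>
      exfalso
      have hx : x = v := by simpa using h2
      have hi' : i < t.length := by simpa using hi
      have h1' : t[i] = v := by simpa using h1
      have hm : v ∈ t := List.mem_iff_getElem.mpr ⟨i, hi', h1'⟩
      have := List.count_pos_iff.mpr hm
      simp [hx] at h; omega
    | i+1, j+1 =>
      have hi' : i < t.length := by simpa using hi
      have hj' : j < t.length := by simpa using hj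
      have h1' : t[i] = v := by simpa using h1
      have h2' : t[j] = v := by simpa using h2
      have hc : t.count v = 1 := by
        by_cases hx : x = v
        · exfalso
          have hm : v ∈ t := List.mem_iff_getElem.mpr ⟨i, hi', h1'⟩
          have := List.count_pos_iff.mpr hm
          simp [hx] at h; omega
        · simpa [beq_iff_eq, hx] using h
      have := ih hc i j hi' hj' h1' h2'
      omega

-- count ≥ 2 yields two distinct occurrence indices
theorem two_le_count_pair (l : List Int) (v : Int) (h : 2 ≤ l.count v) :
    ∃ i j, ∃ _ : i < l.length, ∃ _ : j < l.length, l[i] = v ∧ l[j] = v ∧ i ≠ j := by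
  have hd : List.Sublist [v, v] l := by
    have := (List.duplicate_iff_two_le_count (x := v) (l := l)).mpr h
    exact List.duplicate_iff_sublist.mp this
  clear h
  induction l with
  | nil => simp at hd
  | cons x t ih =>
    rcases List.sublist_cons_iff.mp hd with h2 | ⟨r, hr, hrs⟩
    · obtain ⟨i, j, hi, hj, e1, e2, hne⟩ := ih h2
      exact ⟨i + 1, j + 1, Nat.succ_lt_succ hi, Nat.succ_lt_succ hj,
        by simpa using e1, by simpa using e2, by omega⟩
    · -- [v, v] = x :: r, so x = v and r = [v] <+ t, hence v ∈ t
      have hx : x = v := by cases hr; rfl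
      have hrv : r = [v] := by cases hr; rfl
      subst hrv
      have hm : v ∈ t := by simpa using hrs.subset (List.mem_singleton_self v)
      obtain ⟨k, hk, hkv⟩ := List.mem_iff_getElem.mp hm
      exact ⟨0, k + 1, by simp, Nat.succ_lt_succ hk,
        by simpa using hx, by simpa using hkv, by omega⟩

-- A's raw result list is the flatMap of the filtered inner scans
theorem resultA_eq (lst1 lst2 : List Int) :
    (PySem.List.enumerate lst1).foldl (fun acc p =>
      (PySem.List.enumerate lst2).foldl (fun acc2 q =>
        if p.2 == q.2 && !(p.1 == q.1) then acc2 ++ [p.2] else acc2) acc) []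
    = (PySem.List.enumerate lst1).flatMap (fun p =>
        ((PySem.List.enumerate lst2).filter (fun q => p.2 == q.2 && !(p.1 == q.1))).map
          (fun _ => p.2)) := by
  calc (PySem.List.enumerate lst1).foldl (fun acc p =>
      (PySem.List.enumerate lst2).foldl (fun acc2 q =>
        if p.2 == q.2 && !(p.1 == q.1) then acc2 ++ [p.2] else acc2) acc) []
      = (PySem.List.enumerate lst1).foldl (fun acc p =>
          acc ++ ((PySem.List.enumerate lst2).filter (fun q => p.2 == q.2 && !(p.1 == q.1))).map
            (fun _ => p.2)) [] := by
        refine PySem.List.foldl_congr_mem _ _ _ _ ?_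
        intro acc p _
        exact PySem.List.foldl_append_if _ _ _ _
    _ = _ := by
        simpa using PySem.List.foldl_append_eq_flatMap
          (g := fun p => ((PySem.List.enumerate lst2).filter
            (fun q => p.2 == q.2 && !(p.1 == q.1))).map (fun _ => p.2))
          (l := PySem.List.enumerate lst1) (acc := [])

-- membership in A's raw result is exactly hasDiffPair
theorem mem_resultA_iff (lst1 lst2 : List Int) (v : Int) :
    v ∈ (PySem.List.enumerate lst1).foldl (fun acc p =>
      (PySem.List.enumerate lst2).foldl (fun acc2 q =>
        if p.2 == q.2 && !(p.1 == q.1) then acc2 ++ [p.2] else acc2) acc) []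
    ↔ hasDiffPair lst1 lst2 v := by
  rw [resultA_eq]
  simp only [List.mem_flatMap, List.mem_map, List.mem_filter, hasDiffPair]
  constructor
  · rintro ⟨p, hp, q, ⟨hq, hcond⟩, hv⟩
    obtain ⟨i, hi, rfl⟩ := (PySem.List.mem_enumerate_iff _ _ _).mp hp
    obtain ⟨j, hj, rfl⟩ := (PySem.List.mem_enumerate_iff _ _ _).mp hq
    simp only [Bool.and_eq_true, beq_iff_eq, Bool.not_eq_eq_eq_not, Bool.not_true] at hcond
    refine ⟨i, j, hi, hj, ?_, ?_, ?_⟩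
    · simpa using hv
    · have : lst1[i] = lst2[j] := hcond.1
      rw [← hv]; simpa using this.symm
    · intro hij
      have : ((0 : Int) + i == (0 : Int) + j) = false := hcond.2
      simp [hij] at this
  · rintro ⟨i, j, hi, hj, h1, h2, hij⟩
    refine ⟨((0 : Int) + i, lst1[i]), (PySem.List.mem_enumerate_iff _ _ _).mpr ⟨i, hi, rfl⟩,
      ((0 : Int) + j, lst2[j]), ⟨(PySem.List.mem_enumerate_iff _ _ _).mpr ⟨j, hj, rfl⟩, ?_⟩, h1⟩
    simp only [Bool.and_eq_true, beq_iff_eq, Bool.not_eq_eq_eq_not, Bool.not_true]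
    refine ⟨by rw [h1, h2], ?_⟩
    have : ((0 : Int) + i) ≠ ((0 : Int) + j) := by
      intro h; apply hij
      have : (i : Int) = (j : Int) := by omega
      exact_mod_cast this
    simpa using this

-- B's boolean test, read as a Prop
theorem predB_iff (lst1 lst2 : List Int) (v : Int) :
    ((!(lst1.count v == 1 && lst2.count v == 1 &&
        PySem.List.index? lst1 v == PySem.List.index? lst2 v)) = true)
    ↔ ¬(lst1.count v = 1 ∧ lst2.count v = 1 ∧
        PySem.List.index? lst1 v = PySem.List.index? lst2 v) := by
  simp; tauto

-- membership in B's out list is exactly hasDiffPair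
theorem mem_outB_iff (lst1 lst2 : List Int) (v : Int) :
    v ∈ (PySem.Set.inter (PySem.Set.ofList lst1) (PySem.Set.ofList lst2)).filter (fun v =>
      !(lst1.count v == 1 && lst2.count v == 1 &&
        PySem.List.index? lst1 v == PySem.List.index? lst2 v))
    ↔ hasDiffPair lst1 lst2 v := by
  rw [List.mem_filter, predB_iff]
  rw [show (v ∈ PySem.Set.inter (PySem.Set.ofList lst1) (PySem.Set.ofList lst2)) ↔ (v ∈ lst1 ∧ v ∈ lst2) by
    rw [PySem.Set.mem_inter]; simp [PySem.Set.mem_ofList]]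
  unfold hasDiffPair
  constructor
  · rintro ⟨⟨hm1, hm2⟩, hcond⟩
    by_cases hc1 : lst1.count v = 1
    · by_cases hc2 : lst2.count v = 1
      · -- both unique: the first indices must differ
        have hcond' : PySem.List.index? lst1 v ≠ PySem.List.index? lst2 v := by
          intro h; exact hcond ⟨hc1, hc2, h⟩
        obtain ⟨k1, hk1⟩ := Option.isSome_iff_exists.mp ((PySem.List.index?_isSome_iff _ _).mpr hm1)
        obtain ⟨k2, hk2⟩ := Option.isSome_iff_exists.mp ((PySem.List.index?_isSome_iff _ _).mpr hm2)
        obtain ⟨hlt1, hv1, -⟩ := PySem.List.getElem_of_index?_eq_some hk1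
        obtain ⟨hlt2, hv2, -⟩ := PySem.List.getElem_of_index?_eq_some hk2
        refine ⟨k1, k2, hlt1, hlt2, hv1, hv2, ?_⟩
        intro h; apply hcond'; rw [hk1, hk2, h]
      · -- lst2 has two occurrences; pair one of them with any lst1 occurrence
        have h2 : 2 ≤ lst2.count v := by
          have := List.count_pos_iff.mpr hm2; omega
        obtain ⟨j1, j2, hj1, hj2, hv1, hv2, hne⟩ := two_le_count_pair lst2 v h2
        obtain ⟨i, hi, hvi⟩ := List.mem_iff_getElem.mp hm1
        by_cases hij : i = j1
        · exact ⟨i, j2, hi, hj2, hvi, hv2, by omega⟩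
        · exact ⟨i, j1, hi, hj1, hvi, hv1, hij⟩
    · -- lst1 has two occurrences
      have h2 : 2 ≤ lst1.count v := by
        have := List.count_pos_iff.mpr hm1; omega
      obtain ⟨i1, i2, hi1, hi2, hv1, hv2, hne⟩ := two_le_count_pair lst1 v h2
      obtain ⟨j, hj, hvj⟩ := List.mem_iff_getElem.mp hm2
      by_cases hij : i1 = j
      · exact ⟨i2, j, hi2, hj, hv2, hvj, by omega⟩
      · exact ⟨i1, j, hi1, hj, hv1, hvj, hij⟩
  · rintro ⟨i, j, hi, hj, h1, h2, hij⟩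
    have hm1 : v ∈ lst1 := h1 ▸ List.getElem_mem _
    have hm2 : v ∈ lst2 := h2 ▸ List.getElem_mem _
    refine ⟨⟨hm1, hm2⟩, ?_⟩
    rintro ⟨hc1, hc2, heq⟩
    obtain ⟨k1, hk1⟩ := Option.isSome_iff_exists.mp ((PySem.List.index?_isSome_iff _ _).mpr hm1)
    obtain ⟨k2, hk2⟩ := Option.isSome_iff_exists.mp ((PySem.List.index?_isSome_iff _ _).mpr hm2)
    obtain ⟨hlt1, hv1, -⟩ := PySem.List.getElem_of_index?_eq_some hk1
    obtain ⟨hlt2, hv2, -⟩ := PySem.List.getElem_of_index?_eq_some hk2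
    have e1 : i = k1 := count_one_uniq lst1 v hc1 i k1 hi hlt1 h1 hv1
    have e2 : j = k2 := count_one_uniq lst2 v hc2 j k2 hj hlt2 h2 hv2
    rw [hk1, hk2] at heq
    have : k1 = k2 := by simpa using heq
    omega

theorem main_eq (lst1 lst2 : List Int) :
    find_common_elements_diff_index lst1 lst2 = find_common_elements_diff_index_alt lst1 lst2 := by
  unfold find_common_elements_diff_index find_common_elements_diff_index_alt
  simp only []
  set result := (PySem.List.enumerate lst1).foldl (fun acc p =>
      (PySem.List.enumerate lst2).foldl (fun acc2 q =>
        if p.2 == q.2 && !(p.1 == q.1) then acc2 ++ [p.2] else acc2) acc) [] with hres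
  set out := (PySem.Set.inter (PySem.Set.ofList lst1) (PySem.Set.ofList lst2)).filter (fun v =>
      !(lst1.count v == 1 && lst2.count v == 1 &&
        PySem.List.index? lst1 v == PySem.List.index? lst2 v)) with hout
  have hmem : ∀ v, v ∈ result ↔ v ∈ out := fun v =>
    (mem_resultA_iff lst1 lst2 v).trans (mem_outB_iff lst1 lst2 v).symm
  have hempty : result = [] ↔ out = [] := by
    constructor <;> intro h <;> refine List.eq_nil_iff_forall_not_mem.mpr (fun v hv => ?_)
    · have := (hmem v).mpr hv; rw [h] at this; simp at this
    · have := (hmem v).mp hv; rw [h] at this; simp at this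
  by_cases h : result = []
  · rw [if_pos h, if_pos (hempty.mp h)]
  · rw [if_neg h, if_neg (fun h2 => h (hempty.mpr h2))]
    congr 1
    apply (PySem.List.sorted_id_eq_sorted_id_iff_perm _ _).mpr
    refine (List.perm_ext_iff_of_nodup (PySem.Set.nodup_ofList _) ?_).mpr ?_
    · exact List.Nodup.filter _ (PySem.Set.nodup_inter _ _ (PySem.Set.nodup_ofList _))
    · intro v
      rw [PySem.Set.mem_ofList]
      exact hmem v

-- ===== VERDICT (by name: the statement is the Claim_ definition above) =====
theorem find_common_elements_diff_index_spec : Claim_equal_find_common_elements_diff_index := by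
  intro lst1 lst2 _
  unfold Spec_find_common_elements_diff_index
  exact main_eq lst1 lst2
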